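-- pv_equiv track=rewrite | github.com/giuseppe-bonsignore/FrameRAG | Frame_RAG/build_corpus.py | _group_relations
-- ===== SOURCE A (Python) =====
-- from typing import Dict, List, Tuple, Optional
--
-- def _prefixed(rel_local: str) -> str:
--     if rel_local in {
--         "frameRelation", "inheritsFrom", "subframeOf", "semType",
--         "perspectiveOn", "uses", "reFrameMapping", "feCoreSet"
--     }:
--         return f"pmofn:{rel_local}"
--     if rel_local in {"classRel", "semRole", "item"}:
--         return f"pmo:{rel_local}"
--     if rel_local == "broader":
--         return "skos:broader"
--     if rel_local in {"subFrameOf"}: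
--         return f"fn:{rel_local}"
--     return rel_local
--
-- def _group_relations(relations: List[Tuple[str, str]], hide_semrole: bool = True) -> Dict[str, List[str]]:
--     grouped: Dict[str, List[str]] = {}
--     for rel_local, tgt in relations:
--         if hide_semrole and rel_local == "semRole":
--             continue
--         key = _prefixed(rel_local)
--         grouped.setdefault(key, []).append(tgt)
--     for k in list(grouped.keys()):
--         grouped[k] = sorted(set(grouped[k]))
--     return grouped
-- ===== SOURCE B (Python) =====
-- def _prefixed(rel_local: str) -> str:
--     if rel_local in {
--         "frameRelation", "inheritsFrom", "subframeOf", "semType",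
--         "perspectiveOn", "uses", "reFrameMapping", "feCoreSet"
--     }:
--         return f"pmofn:{rel_local}"
--     if rel_local in {"classRel", "semRole", "item"}:
--         return f"pmo:{rel_local}"
--     if rel_local == "broader":
--         return "skos:broader"
--     if rel_local in {"subFrameOf"}:
--         return f"fn:{rel_local}"
--     return rel_local
--
--
-- def _group_relations(relations, hide_semrole: bool = True):
--     # One global sort by target, then a single pass with adjacent dedup:
--     # each group receives its targets already sorted and unique.
--     kept = [(_prefixed(rel), tgt) for rel, tgt in relations
--             if not (hide_semrole and rel == "semRole")]
--     grouped = {k: [] for k, _ in kept}   # keys in first-occurrence order, as A produces them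
--     for k, t in sorted(kept, key=lambda p: p[1]):
--         g = grouped[k]
--         if not g or g[-1] != t:
--             g.append(t)
--     return grouped
-- ===== Notes on version B (the rewrite author's own statement) =====
-- stated objective: alternative
-- what changed: B replaces A's build-groups-then-run-sorted(set(...))-per-key scheme by one global stable sort of the kept relations on the target followed by a single pass that appends each target to its group with adjacent dedup, so every group comes out sorted and unique without any per-key sort/set pass.
import Mathlib
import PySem

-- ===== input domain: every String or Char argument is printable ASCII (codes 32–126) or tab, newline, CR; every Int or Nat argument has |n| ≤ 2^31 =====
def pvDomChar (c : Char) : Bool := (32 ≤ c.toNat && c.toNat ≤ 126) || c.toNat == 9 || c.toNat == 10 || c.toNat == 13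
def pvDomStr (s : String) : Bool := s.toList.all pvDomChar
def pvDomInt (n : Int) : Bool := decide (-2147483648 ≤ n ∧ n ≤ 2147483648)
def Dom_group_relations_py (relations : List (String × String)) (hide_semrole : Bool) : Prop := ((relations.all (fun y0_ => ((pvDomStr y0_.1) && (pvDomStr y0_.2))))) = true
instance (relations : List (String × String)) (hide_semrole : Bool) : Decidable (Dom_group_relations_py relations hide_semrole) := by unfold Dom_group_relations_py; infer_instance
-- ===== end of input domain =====

-- B replaces the per-key sorted(set(...)) passes by one global stable sort on the target followed by a single adjacent-dedup pass; alternative decomposition, same return value.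


-- ===== PORT A =====
-- shared module helper _prefixed (used verbatim by both Pythons)
def prefixed (rel_local : String) : String :=
  if rel_local ∈ ["frameRelation", "inheritsFrom", "subframeOf", "semType",
                  "perspectiveOn", "uses", "reFrameMapping", "feCoreSet"] then
    "pmofn:" ++ rel_local
  else if rel_local ∈ ["classRel", "semRole", "item"] then
    "pmo:" ++ rel_local
  else if rel_local = "broader" then
    "skos:broader"
  else if rel_local ∈ ["subFrameOf"] then
    "fn:" ++ rel_local
  else rel_local

def group_relations_py (relations : List (String × String)) (hide_semrole : Bool) : List (String × List String) :=
  -- grouped.setdefault(key, []).append(tgt)  ==  grouped[key] = grouped.get(key, []) + [tgt]  ==  Dict.modify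
  let grouped : PySem.Dict String (List String) :=
    relations.foldl (fun d p =>
      if hide_semrole && p.1 == "semRole" then d
      else d.modify (prefixed p.1) [] (· ++ [p.2])) PySem.Dict.empty
  -- for k in list(grouped.keys()): grouped[k] = sorted(set(grouped[k]))
  let grouped2 :=
    grouped.keys.foldl (fun d k =>
      d.insert k (PySem.List.sorted (PySem.Set.ofList (d.getD k [])) (fun x => x) false)) grouped
  grouped2.items

-- ===== PORT B =====
def group_relations_py_alt (relations : List (String × String)) (hide_semrole : Bool) : List (String × List String) :=
  let kept := (relations.filter (fun p => !(hide_semrole && p.1 == "semRole"))).map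
                (fun p => (prefixed p.1, p.2))
  -- grouped = {k: [] for k, _ in kept}
  let grouped0 : PySem.Dict String (List String) :=
    (kept.map (·.1)).foldl (fun d k => d.insert k []) PySem.Dict.empty
  -- for k, t in sorted(kept, key=lambda p: p[1]): adjacent dedup append
  let grouped :=
    (PySem.List.sorted kept (fun p => p.2) false).foldl (fun d p =>
      d.modify p.1 [] (fun g => if g = [] ∨ g.getLast? ≠ some p.2 then g ++ [p.2] else g)) grouped0
  grouped.items

-- ===== PRECONDITION & SPEC =====
-- A raises on no well-typed input, so there is no Pre_.
def Spec_group_relations_py (relations : List (String × String)) (hide_semrole : Bool) (out : List (String × List String)) : Prop := out = group_relations_py_alt relations hide_semrole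
instance (relations : List (String × String)) (hide_semrole : Bool) (out : List (String × List String)) : Decidable (Spec_group_relations_py relations hide_semrole out) := by unfold Spec_group_relations_py; infer_instance

-- ===== CLAIM (what is proved, stated in full; the proofs are below) =====
def Claim_equal_group_relations_py : Prop := ∀ (relations : List (String × String)) (hide_semrole : Bool), Dom_group_relations_py relations hide_semrole → Spec_group_relations_py relations hide_semrole (group_relations_py relations hide_semrole)

-- ===== LEMMAS AND PROOFS =====

theorem foldl_skip {α β : Type} (c : α → Bool) (F : β → α → β) :
    ∀ (l : List α) (d : β), l.foldl (fun d x => if c x then d else F d x) d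
      = (l.filter (fun x => !c x)).foldl F d := by
  intro l
  induction l with
  | nil => intro d; rfl
  | cons x xs ih =>
    intro d
    by_cases h : c x = true <;> simp [h, ih]

-- elements of a strictly sorted list are ≤ its last element
theorem le_getLast_of_pairwise_lt {A : List String} (hp : A.Pairwise (· < ·))
    {m : String} (hl : A.getLast? = some m) : ∀ x ∈ A, x ≤ m := by
  intro x hx
  have hne : A ≠ [] := by rintro rfl; simp at hl
  have hAeq : A.dropLast ++ [A.getLast hne] = A := List.dropLast_concat_getLast hne
  have hm : A.getLast hne = m := by
    have := List.getLast?_eq_some_getLast (l := A) hne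
    rw [hl] at this; exact (Option.some_inj.mp this.symm)
  rw [← hAeq, hm] at hx
  rcases List.mem_append.mp hx with h1 | h1
  · have hp' : (A.dropLast ++ [m]).Pairwise (· < ·) := by rw [hAeq.symm, hm] at hp; exact hp
    exact le_of_lt ((List.pairwise_append.mp hp').2.2 x h1 m (by simp))
  · simp at h1; exact le_of_eq h1

theorem adj_fold (l : List String) (hs : l.Pairwise (· ≤ ·)) :
    (l.foldl (fun g t => if g = [] ∨ g.getLast? ≠ some t then g ++ [t] else g) []).Pairwise (· < ·)
    ∧ (∀ x, x ∈ l.foldl (fun g t => if g = [] ∨ g.getLast? ≠ some t then g ++ [t] else g) [] ↔ x ∈ l)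
    ∧ (l.foldl (fun g t => if g = [] ∨ g.getLast? ≠ some t then g ++ [t] else g) []).getLast? = l.getLast? := by
  induction l using List.reverseRecOn with
  | nil => simp
  | append_singleton l t ih =>
    rw [List.pairwise_append] at hs
    obtain ⟨hl, -, hb⟩ := hs
    have hbt : ∀ x ∈ l, x ≤ t := by intro x hx; exact hb x hx t (by simp)
    obtain ⟨hp, hm, hlast⟩ := ih hl
    rw [List.foldl_append]
    set A := l.foldl (fun g t => if g = [] ∨ g.getLast? ≠ some t then g ++ [t] else g) [] with hA
    simp only [List.foldl_cons, List.foldl_nil]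
    by_cases hc : A = [] ∨ A.getLast? ≠ some t
    · rw [if_pos hc]
      have hmemA : ∀ x ∈ A, x < t := by
        intro x hx
        have hxl : x ∈ l := (hm x).mp hx
        rcases lt_or_eq_of_le (hbt x hxl) with h | h
        · exact h
        · subst h
          exfalso
          have hne : A ≠ [] := by intro h0; rw [h0] at hx; simp at hx
          rcases hc with h0 | hlt
          · exact hne h0
          have hlastm : A.getLast? = some (A.getLast hne) := List.getLast?_eq_some_getLast hne
          set m := A.getLast hne with hm'
          have hmem_m : m ∈ A := List.getLast_mem hne
          have hmt : m ≤ x := hbt m ((hm m).mp hmem_m)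
          have hxm : x ≤ m := le_getLast_of_pairwise_lt hp hlastm x hx
          exact hlt (by rw [hlastm, le_antisymm hmt hxm])
      refine ⟨?_, ?_, by simp⟩
      · rw [List.pairwise_append]
        exact ⟨hp, List.pairwise_singleton _ _, fun x hx y hy => by simp at hy; subst hy; exact hmemA x hx⟩
      · intro x; simp [hm x]
    · rw [if_neg hc]
      simp only [not_or, not_not] at hc
      obtain ⟨hne, hlt⟩ := hc
      refine ⟨hp, ?_, by rw [hlt]; simp⟩
      intro x
      constructor
      · intro hx; simp [(hm x).mp hx]
      · intro hx
        rcases List.mem_append.mp hx with h1 | h1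
        · exact (hm x).mpr h1
        · simp at h1; subst h1
          exact List.mem_of_getLast? hlt

-- getD through B's conditional-append modify loop
theorem getD_modify_fold (F : String → List String → List String) :
    ∀ (l : List (String × String)) (d : PySem.Dict String (List String)) (c : String),
      (l.foldl (fun d p => d.modify p.1 [] (F p.2)) d).getD c []
        = ((l.filter (fun p => p.1 == c)).map (·.2)).foldl (fun g t => F t g) (d.getD c []) := by
  intro l
  induction l with
  | nil => intro d c; rfl
  | cons p ps ih =>
    intro d c
    simp only [List.foldl_cons]
    rw [ih]
    by_cases h : p.1 = c
    · simp [h]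
    · simp [h, PySem.Dict.getD_modify, Ne.symm h]

-- getD unchanged by inserts at other keys
theorem getD_foldl_insert_not_mem (S : List String → List String) :
    ∀ (ks : List String) (d : PySem.Dict String (List String)) (k : String), k ∉ ks →
      (ks.foldl (fun d k => d.insert k (S (d.getD k []))) d).getD k [] = d.getD k [] := by
  intro ks
  induction ks with
  | nil => intro d k _; rfl
  | cons k0 ks ih =>
    intro d k hk
    simp only [List.mem_cons, not_or] at hk
    simp only [List.foldl_cons]
    rw [ih _ _ hk.2, PySem.Dict.getD_insert_of_ne _ _ _ hk.1]

-- getD after processing k once (nodup key list)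
theorem getD_foldl_insert_mem (S : List String → List String) :
    ∀ (ks : List String) (d : PySem.Dict String (List String)) (k : String), ks.Nodup → k ∈ ks →
      (ks.foldl (fun d k => d.insert k (S (d.getD k []))) d).getD k [] = S (d.getD k []) := by
  intro ks
  induction ks with
  | nil => intro d k _ h; simp at h
  | cons k0 ks ih =>
    intro d k hnd hk
    simp only [List.foldl_cons]
    rcases List.mem_cons.mp hk with h | h
    · subst h
      rw [getD_foldl_insert_not_mem S ks _ k (List.nodup_cons.mp hnd).1,
          PySem.Dict.getD_insert_self]
    · rw [ih _ _ (List.nodup_cons.mp hnd).2 h,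
          PySem.Dict.getD_insert_of_ne _ _ _ (by rintro rfl; exact (List.nodup_cons.mp hnd).1 h)]

-- keys unchanged by the insert loop when every key is already present
theorem keys_foldl_insert_contains (S : List String → List String) :
    ∀ (ks : List String) (d : PySem.Dict String (List String)),
      (∀ k ∈ ks, d.contains k = true) →
      (ks.foldl (fun d k => d.insert k (S (d.getD k []))) d).keys = d.keys := by
  intro ks
  induction ks with
  | nil => intro d _; rfl
  | cons k0 ks ih =>
    intro d h
    simp only [List.foldl_cons]
    rw [ih _ (fun k hk => by rw [PySem.Dict.contains_insert]; simp [h k (by simp [hk])]),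
        PySem.Dict.keys_insert_of_contains _ _ (h k0 (by simp))]

-- dict filled with [] at every inserted key: getD is always []
theorem getD_foldl_insert_nil :
    ∀ (ks : List String) (d : PySem.Dict String (List String)) (c : String), d.getD c [] = [] →
      (ks.foldl (fun d k => d.insert k []) d).getD c [] = [] := by
  intro ks
  induction ks with
  | nil => intro d c h; exact h
  | cons k0 ks ih =>
    intro d c h
    simp only [List.foldl_cons]
    exact ih _ _ (by rw [PySem.Dict.getD_insert]; split <;> simp [h])

-- Set.update by elements already present is the identity
theorem set_update_subset :
    ∀ (xs : List String) (s : PySem.Set String), (∀ x ∈ xs, x ∈ s) → PySem.Set.update s xs = s := by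
  intro xs
  induction xs with
  | nil => intro s _; rfl
  | cons x xs ih =>
    intro s h
    have : PySem.Set.add s x = s := by
      simp only [PySem.Set.add]
      split
      · rfl
      · next hc =>
        exfalso
        exact hc (by simpa [PySem.Set.contains] using h x (by simp))
    calc PySem.Set.update s (x :: xs) = PySem.Set.update (PySem.Set.add s x) xs := rfl
      _ = s := by rw [this]; exact ih s (fun y hy => h y (by simp [hy]))

-- per-key: adjacent dedup of the key's targets in globally target-sorted order = sorted(set(targets))
theorem per_key (kept : List (String × String)) (c : String) :
    (((PySem.List.sorted kept (fun p => p.2) false).filter (fun p => p.1 == c)).map (·.2)).foldl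
        (fun g t => if g = [] ∨ g.getLast? ≠ some t then g ++ [t] else g) []
    = PySem.List.sorted (PySem.Set.ofList ((kept.filter (fun p => p.1 == c)).map (·.2))) (fun x => x) false := by
  set ts := ((PySem.List.sorted kept (fun p => p.2) false).filter (fun p => p.1 == c)).map (·.2) with hts
  set tgts := (kept.filter (fun p => p.1 == c)).map (·.2) with htg
  have hperm : ts.Perm tgts :=
    ((PySem.List.sorted_perm kept (fun p => p.2) false).filter _).map _
  have hpair : ts.Pairwise (· ≤ ·) := by
    rw [hts]
    refine List.pairwise_map.mpr ?_
    exact List.Pairwise.sublist List.filter_sublist (PySem.List.sorted_pairwise kept (fun p => p.2))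
  obtain ⟨hlt, hmem, -⟩ := adj_fold ts hpair
  have hnd : (ts.foldl (fun g t => if g = [] ∨ g.getLast? ≠ some t then g ++ [t] else g) []).Nodup :=
    hlt.imp (fun h => ne_of_lt h)
  have hperm2 : (ts.foldl (fun g t => if g = [] ∨ g.getLast? ≠ some t then g ++ [t] else g) []).Perm
      (PySem.Set.ofList tgts) := by
    rw [List.perm_ext_iff_of_nodup hnd (PySem.Set.nodup_ofList _)]
    intro a
    rw [hmem a, PySem.Set.mem_ofList]
    exact hperm.mem_iff
  exact (PySem.List.sorted_eq_of_perm_of_pairwise_lt _ _ (fun x => x) hperm2 hlt).symm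

theorem main_eq (relations : List (String × String)) (hide_semrole : Bool) :
    group_relations_py relations hide_semrole = group_relations_py_alt relations hide_semrole := by
  unfold group_relations_py group_relations_py_alt
  dsimp only
  set kept := (relations.filter (fun p => !(hide_semrole && p.1 == "semRole"))).map
                (fun p => (prefixed p.1, p.2)) with hkept
  -- A's first loop = modify-fold over kept
  have hskip : relations.foldl (fun d p =>
      if hide_semrole && p.1 == "semRole" then d
      else d.modify (prefixed p.1) [] (· ++ [p.2])) PySem.Dict.empty
      = kept.foldl (fun d p => d.modify p.1 [] (· ++ [p.2])) PySem.Dict.empty := by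
    rw [hkept, List.foldl_map]
    exact foldl_skip (fun p => hide_semrole && p.1 == "semRole")
          (fun d p => d.modify (prefixed p.1) [] (· ++ [p.2])) relations PySem.Dict.empty
  rw [hskip]
  set g1 := kept.foldl (fun d p => d.modify p.1 [] (· ++ [p.2])) PySem.Dict.empty with hg1
  have hkeys1 : g1.keys = PySem.Set.ofList (kept.map (·.1)) := by
    rw [hg1, PySem.Dict.keys_foldl_modify_key kept (·.1) [] (fun _ p => (· ++ [p.2])) PySem.Dict.empty,
        PySem.Dict.keys_empty]
    rfl
  have hnd1 : g1.keys.Nodup := by rw [hkeys1]; exact PySem.Set.nodup_ofList _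
  have hgetD1 : ∀ c, g1.getD c [] = (kept.filter (fun p => p.1 == c)).map (·.2) := by
    intro c
    rw [hg1, PySem.Dict.getD_foldl_modify_append kept PySem.Dict.empty c, PySem.Dict.getD_empty,
        List.nil_append]
  -- A's second loop
  set SS : List String → List String :=
    fun l => PySem.List.sorted (PySem.Set.ofList l) (fun x => x) false with hSS
  set g2 := g1.keys.foldl (fun d k => d.insert k (SS (d.getD k []))) g1 with hg2
  have hkeys2 : g2.keys = g1.keys := by
    rw [hg2]
    exact keys_foldl_insert_contains SS g1.keys g1
      (fun k hk => (PySem.Dict.contains_iff_mem_keys g1 k).mpr hk)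
  have hgetD2 : ∀ k ∈ g1.keys, g2.getD k [] = SS (g1.getD k []) := by
    intro k hk
    rw [hg2]
    exact getD_foldl_insert_mem SS g1.keys g1 k hnd1 hk
  have hitemsA : g2.items = g1.keys.map (fun k => (k, SS (g1.getD k []))) := by
    rw [PySem.Dict.items_eq_map_keys g2 (by rw [hkeys2]; exact hnd1) [], hkeys2]
    exact List.map_congr_left (fun k hk => by rw [hgetD2 k hk])
  -- B's init dict
  set d0 : PySem.Dict String (List String) := (kept.map (·.1)).foldl (fun d k => d.insert k ([] : List String)) PySem.Dict.empty with hd0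
  have hkeys0 : d0.keys = PySem.Set.ofList (kept.map (·.1)) := by
    rw [hd0, PySem.Dict.keys_foldl_insert (kept.map (·.1)) (fun _ _ => []) PySem.Dict.empty,
        PySem.Dict.keys_empty]
    rfl
  have hgetD0 : ∀ c, d0.getD c [] = [] := by
    intro c
    rw [hd0]
    exact getD_foldl_insert_nil (kept.map (·.1)) PySem.Dict.empty c (PySem.Dict.getD_empty c [])
  -- B's main loop
  set g := (PySem.List.sorted kept (fun p => p.2) false).foldl (fun d p =>
      d.modify p.1 [] (fun g => if g = [] ∨ g.getLast? ≠ some p.2 then g ++ [p.2] else g)) d0 with hg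
  have hkeysB : g.keys = PySem.Set.ofList (kept.map (·.1)) := by
    have h1 : g.keys = PySem.Set.update d0.keys
        ((PySem.List.sorted kept (fun p => p.2) false).map (fun p => p.1)) :=
      PySem.Dict.keys_foldl_modify_key (PySem.List.sorted kept (fun p => p.2) false)
        (fun p => p.1) ([] : List String)
        (fun _ p => (fun g => if g = [] ∨ g.getLast? ≠ some p.2 then g ++ [p.2] else g)) d0
    rw [h1, hkeys0]
    exact set_update_subset _ _ (fun x hx => by
      obtain ⟨p, hp, rfl⟩ := List.mem_map.mp hx
      exact (PySem.Set.mem_ofList _ _).mpr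
        (List.mem_map.mpr ⟨p, (PySem.List.mem_sorted _ _ _ _).mp hp, rfl⟩))
  have hgetDB : ∀ c, g.getD c []
      = (((PySem.List.sorted kept (fun p => p.2) false).filter (fun p => p.1 == c)).map (·.2)).foldl
          (fun g t => if g = [] ∨ g.getLast? ≠ some t then g ++ [t] else g) [] := by
    intro c
    have h1 := getD_modify_fold
      (fun t => fun g => if g = [] ∨ g.getLast? ≠ some t then g ++ [t] else g)
      (PySem.List.sorted kept (fun p => p.2) false) d0 c
    rw [show g.getD c [] = ((((PySem.List.sorted kept (fun p => p.2) false).filter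
          (fun p => p.1 == c)).map (·.2)).foldl
          (fun g t => if g = [] ∨ g.getLast? ≠ some t then g ++ [t] else g) (d0.getD c [])) from h1,
        hgetD0]
  have hitemsB : g.items = (PySem.Set.ofList (kept.map (·.1))).map
      (fun k => (k, g.getD k [])) := by
    rw [PySem.Dict.items_eq_map_keys g (by rw [hkeysB]; exact PySem.Set.nodup_ofList _) [], hkeysB]
  -- put both sides together
  rw [hitemsA, hitemsB, hkeys1]
  exact List.map_congr_left (fun k _ => by rw [hgetDB k, per_key kept k, hgetD1 k, hSS])

-- ===== VERDICT (by name: the statement is the Claim_ definition above) =====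
theorem group_relations_py_spec : Claim_equal_group_relations_py := by
  intro relations hide_semrole _
  unfold Spec_group_relations_py
  exact main_eq relations hide_semrole
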